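-- pv_equiv track=rewrite | github.com/lihuanshuai/backend-skills | skills/python-upgrade-deps/scripts/upgrade_dep.py | parse_req_line
-- ===== SOURCE A (Python) =====
-- VERSION_SPECIFIERS = ["===", "!=", ">=", "<=", "==", "~=", ">", "<"]
--
-- def normalize_package_name(name: str) -> str:
--     """Extract base package name for comparison (lowercase, no extras)."""
--     return name.split("[")[0].strip().lower()
--
-- def parse_req_line(line: str) -> tuple[str | None, str]:
--     """
--     Parse a requirements line. Returns (package_base_name, package_part) if it's a
--     package line with version specifier, else (None, "").
--     package_part is the package name with extras, e.g. "ArticleCommonLib" or "pkg[extra]".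
--     """
--     line_stripped = line.strip()
--     if not line_stripped or line_stripped.startswith("#") or line_stripped.startswith("-"):
--         return (None, "")
--
--     # Split off inline comment
--     main_part = line_stripped
--     if " #" in line_stripped:
--         idx = line_stripped.index(" #")
--         main_part = line_stripped[:idx].strip()
--     if " ;" in main_part:
--         idx = main_part.index(" ;")
--         main_part = main_part[:idx].strip()
--
--     # Find version specifier (prefer longer matches first)
--     specifier = None
--     spec_pos = -1
--     for spec in VERSION_SPECIFIERS:
--         pos = main_part.find(spec)
--         if pos >= 0 and (spec_pos < 0 or pos < spec_pos):
--             spec_pos = pos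
--             specifier = spec
--
--     if specifier is None or spec_pos < 0:
--         return (None, "")
--
--     package_part = main_part[:spec_pos].strip()
--     pkg_base = normalize_package_name(package_part)
--     return (pkg_base, package_part)
-- ===== SOURCE B (Python) =====
-- def normalize_package_name(name: str) -> str:
--     """Extract base package name for comparison (lowercase, no extras)."""
--     return name.split("[")[0].strip().lower()
--
--
-- def _find_spec_start(main_part: str):
--     """Single left-to-right scan: first index where a version specifier starts.
--
--     A specifier starts at i iff main_part[i] is '>' or '<', or main_part[i]
--     is one of '=', '!', '~' immediately followed by '='.
--     """
--     for i, c in enumerate(main_part):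
--         if c in "<>" or (c in "=!~" and main_part[i + 1:i + 2] == "="):
--             return i
--     return None
--
--
-- def parse_req_line(line: str) -> tuple:
--     line_stripped = line.strip()
--     if not line_stripped or line_stripped.startswith("#") or line_stripped.startswith("-"):
--         return (None, "")
--
--     main_part = line_stripped
--     if " #" in line_stripped:
--         main_part = line_stripped[:line_stripped.index(" #")].strip()
--     if " ;" in main_part:
--         main_part = main_part[:main_part.index(" ;")].strip()
--
--     cut = _find_spec_start(main_part)
--     if cut is None:
--         return (None, "")
--
--     package_part = main_part[:cut].strip()
--     return (normalize_package_name(package_part), package_part)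
-- ===== Notes on version B (the rewrite author's own statement) =====
-- stated objective: alternative
-- what changed: A locates the version specifier by running eight separate str.find passes (one per specifier) and taking the minimum position; B makes one left-to-right scan over main_part and stops at the first index where any specifier starts.
import Mathlib
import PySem

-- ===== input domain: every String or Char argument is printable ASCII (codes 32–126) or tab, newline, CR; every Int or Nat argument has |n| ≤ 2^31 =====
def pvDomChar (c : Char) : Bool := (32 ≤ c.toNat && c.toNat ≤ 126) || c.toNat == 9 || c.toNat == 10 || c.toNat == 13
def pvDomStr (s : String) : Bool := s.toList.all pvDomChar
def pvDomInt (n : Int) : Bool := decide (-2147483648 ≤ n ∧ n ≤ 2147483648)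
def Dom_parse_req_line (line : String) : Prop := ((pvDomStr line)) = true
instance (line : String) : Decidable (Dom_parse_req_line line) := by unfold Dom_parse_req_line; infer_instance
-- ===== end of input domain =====

-- B replaces A's eight separate find-and-min passes over main_part by one single
-- left-to-right scan that stops at the first position where any version specifier
-- starts (objective: alternative traversal; same guards and comment splitting).

-- ===== PORT A =====

-- VERSION_SPECIFIERS
def pvSpecs : List (List Char) :=
  [['=','=','='], ['!','='], ['>','='], ['<','='], ['=','='], ['~','='], ['>'], ['<']]

-- normalize_package_name: name.split("[")[0].strip().lower()
-- (split with a non-empty separator always returns a non-empty list, so taking the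
--  head is Python's [0]; the `| _ => []` arm is unreachable)
def pvNormalize (name : List Char) : List Char :=
  PySem.Chars.lower (PySem.Chars.strip
    (match PySem.Chars.split? name ['['] with
     | some (h :: _) => h
     | _ => []))

-- the second half of A on main_part: the for-loop over VERSION_SPECIFIERS
-- keeping (specifier, spec_pos), then the guard and the return
def pvFindAndCut (m : List Char) : Option String × String :=
  let st := pvSpecs.foldl (fun (st : Option (List Char) × Int) spec =>
      let pos := PySem.Chars.find m spec
      if 0 ≤ pos ∧ (st.2 < 0 ∨ pos < st.2) then (some spec, pos) else st) (none, -1)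
  if st.1 = none ∨ st.2 < 0 then (none, "")
  else
    let package_part := PySem.Chars.strip (PySem.List.slice m none (some st.2))
    (some (String.ofList (pvNormalize package_part)), String.ofList package_part)

def parse_req_line (line : String) : Option String × String :=
  let ls := PySem.Chars.strip line.toList
  if ls = [] ∨ PySem.Chars.startswith ls ['#'] ∨ PySem.Chars.startswith ls ['-'] then (none, "")
  else
    -- `line_stripped.index(" #")` is guarded by the `in` test, so it equals find (≥ 0)
    let main1 := if PySem.Chars.isIn [' ', '#'] ls then
        PySem.Chars.strip (PySem.List.slice ls none (some (PySem.Chars.find ls [' ', '#'])))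
      else ls
    let main2 := if PySem.Chars.isIn [' ', ';'] main1 then
        PySem.Chars.strip (PySem.List.slice main1 none (some (PySem.Chars.find main1 [' ', ';'])))
      else main1
    pvFindAndCut main2

-- ===== PORT B =====

-- does a version specifier start at the head of this suffix?
-- (c in "<>" or (c in "=!~" and next char is "="); the [i+1:i+2] == "=" test is
--  "the list has a next element and it is '='", i.e. headD with a non-'=' default)
def pvHit : List Char → Bool
  | [] => false
  | c :: rest =>
      (c == '<' || c == '>') || ((c == '=' || c == '!' || c == '~') && (rest.headD ' ' == '='))

-- _find_spec_start: single scan, first index whose suffix starts a specifier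
def pvScanSpec : List Char → Option Nat
  | [] => none
  | c :: rest => if pvHit (c :: rest) then some 0 else (pvScanSpec rest).map (· + 1)

-- the second half of B on main_part: scan once, cut there
-- (main_part[:cut] with 0 ≤ cut is take)
def pvScanAndCut (m : List Char) : Option String × String :=
  match pvScanSpec m with
  | none => (none, "")
  | some cut =>
      let package_part := PySem.Chars.strip (m.take cut)
      (some (String.ofList (pvNormalize package_part)), String.ofList package_part)

def parse_req_line_alt (line : String) : Option String × String :=
  let ls := PySem.Chars.strip line.toList
  if ls = [] ∨ PySem.Chars.startswith ls ['#'] ∨ PySem.Chars.startswith ls ['-'] then (none, "")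
  else
    let main1 := if PySem.Chars.isIn [' ', '#'] ls then
        PySem.Chars.strip (PySem.List.slice ls none (some (PySem.Chars.find ls [' ', '#'])))
      else ls
    let main2 := if PySem.Chars.isIn [' ', ';'] main1 then
        PySem.Chars.strip (PySem.List.slice main1 none (some (PySem.Chars.find main1 [' ', ';'])))
      else main1
    pvScanAndCut main2

-- ===== PRECONDITION & SPEC =====
def Spec_parse_req_line (line : String) (out : Option String × String) : Prop := out = parse_req_line_alt line
instance (line : String) (out : Option String × String) : Decidable (Spec_parse_req_line line out) := by unfold Spec_parse_req_line; infer_instance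

-- ===== CLAIM (what is proved, stated in full; the proofs are below) =====
def Claim_equal_parse_req_line : Prop := ∀ (line : String), Dom_parse_req_line line → Spec_parse_req_line line (parse_req_line line)

-- ===== LEMMAS AND PROOFS =====

-- a specifier starts at the head of l ↔ some spec of the table is a prefix of l
theorem pvHit_iff (l : List Char) : pvHit l = true ↔ ∃ s ∈ pvSpecs, s <+: l := by
  match l with
  | [] => simp [pvHit, pvSpecs]
  | [c] =>
      simp [pvHit, pvSpecs, List.cons_prefix_cons]
      constructor
      · rintro (h | h) <;> subst_vars <;> simp
      · rintro (h | h) <;> subst_vars <;> simp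
  | c :: d :: rest =>
      simp [pvHit, pvSpecs, List.cons_prefix_cons]
      constructor
      · rintro ((h | h) | ⟨((h | h) | h), h2⟩) <;> subst_vars <;> simp
      · rintro (⟨h1, h2, _⟩ | ⟨h1, h2⟩ | ⟨h1, h2⟩ | ⟨h1, h2⟩ | ⟨h1, h2⟩ | ⟨h1, h2⟩ | h | h) <;>
          subst_vars <;> simp

theorem pvScan_none_iff (m : List Char) :
    pvScanSpec m = none ↔ ∀ j, pvHit (m.drop j) = false := by
  induction m with
  | nil => simp [pvScanSpec, pvHit]
  | cons c rest ih =>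
      simp only [pvScanSpec]
      by_cases h : pvHit (c :: rest) = true
      · rw [if_pos h]
        constructor
        · intro hc; exact absurd hc (by simp)
        · intro hall; exact absurd (hall 0) (by simp [h])
      · rw [if_neg (by simp [h]), Option.map_eq_none_iff, ih]
        constructor
        · intro hall j
          cases j with
          | zero => simpa using Bool.eq_false_iff.mpr h
          | succ k => simpa using hall k
        · intro hall k; simpa using hall (k + 1)

theorem pvScan_some_iff (m : List Char) (j : Nat) :
    pvScanSpec m = some j ↔
      pvHit (m.drop j) = true ∧ ∀ k < j, pvHit (m.drop k) = false := by
  induction m generalizing j with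
  | nil => simp [pvScanSpec, pvHit]
  | cons c rest ih =>
      simp only [pvScanSpec]
      by_cases h : pvHit (c :: rest) = true
      · rw [if_pos h]
        constructor
        · intro hc
          cases hc
          exact ⟨by simpa using h, by omega⟩
        · rintro ⟨hj, hmin⟩
          cases j with
          | zero => rfl
          | succ k => exact absurd h (by simpa using hmin 0 (by omega))
      · rw [if_neg (by simp [h])]
        cases j with
        | zero =>
            simp only [List.drop_zero]
            constructor
            · intro hc
              rcases Option.map_eq_some_iff.mp hc with ⟨k', hk1, hk2⟩
              omega
            · rintro ⟨hj, _⟩; exact absurd hj h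
        | succ k =>
            rw [Option.map_eq_some_iff]
            constructor
            · rintro ⟨k', hk', hkk⟩
              have hkeq : k' = k := by omega
              rw [hkeq] at hk'
              rcases (ih k).mp hk' with ⟨h1, h2⟩
              refine ⟨by simpa using h1, ?_⟩
              intro i hi
              cases i with
              | zero => simpa using Bool.eq_false_iff.mpr h
              | succ i' => simpa using h2 i' (by omega)
            · rintro ⟨hj, hmin⟩
              refine ⟨k, (ih k).mpr ⟨by simpa using hj, ?_⟩, rfl⟩
              intro i hi
              simpa using hmin (i + 1) (by omega)

-- the int-only version of A's fold step
def pvStepI (m : List Char) (p : Int) (s : List Char) : Int :=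
  if 0 ≤ PySem.Chars.find m s ∧ (p < 0 ∨ PySem.Chars.find m s < p) then PySem.Chars.find m s else p

-- the pair fold's second component is the int fold; its first is none iff the second is < 0
theorem pvFold_pair (m : List Char) :
    ∀ (specs : List (List Char)) (st : Option (List Char) × Int),
      (st.1 = none ↔ st.2 < 0) →
      (specs.foldl (fun (st : Option (List Char) × Int) spec =>
          let pos := PySem.Chars.find m spec
          if 0 ≤ pos ∧ (st.2 < 0 ∨ pos < st.2) then (some spec, pos) else st) st).2
        = specs.foldl (pvStepI m) st.2 ∧
      ((specs.foldl (fun (st : Option (List Char) × Int) spec =>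
          let pos := PySem.Chars.find m spec
          if 0 ≤ pos ∧ (st.2 < 0 ∨ pos < st.2) then (some spec, pos) else st) st).1 = none
        ↔ specs.foldl (pvStepI m) st.2 < 0) := by
  intro specs
  induction specs with
  | nil => intro st h; simpa [pvStepI] using h
  | cons s rest ih =>
      intro st h
      simp only [List.foldl_cons]
      by_cases hc : 0 ≤ PySem.Chars.find m s ∧ (st.2 < 0 ∨ PySem.Chars.find m s < st.2)
      · have h1 : pvStepI m st.2 s = PySem.Chars.find m s := by simp [pvStepI, hc]
        rw [h1]
        have := ih (some s, PySem.Chars.find m s) (by simp; omega)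
        simpa [hc] using this
      · have h1 : pvStepI m st.2 s = st.2 := by simp [pvStepI, hc]
        rw [h1]
        have := ih st h
        simpa [hc] using this

-- characterisation of the int fold started at p ∈ {-1} ∪ [0, ∞)
theorem pvFoldI_spec (m : List Char) :
    ∀ (specs : List (List Char)) (p : Int), p = -1 ∨ 0 ≤ p →
      (specs.foldl (pvStepI m) p = p ∧ ∀ s ∈ specs, PySem.Chars.find m s = -1) ∨
      (0 ≤ specs.foldl (pvStepI m) p ∧
        (specs.foldl (pvStepI m) p = p ∨ ∃ s ∈ specs, PySem.Chars.find m s = specs.foldl (pvStepI m) p) ∧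
        (0 ≤ p → specs.foldl (pvStepI m) p ≤ p) ∧
        ∀ s ∈ specs, 0 ≤ PySem.Chars.find m s → specs.foldl (pvStepI m) p ≤ PySem.Chars.find m s) := by
  intro specs
  induction specs with
  | nil =>
      intro p hp
      rcases hp with hp | hp
      · left; simp
      · right; simp [hp]
  | cons s rest ih =>
      intro p hp
      simp only [List.foldl_cons]
      by_cases hc : 0 ≤ PySem.Chars.find m s ∧ (p < 0 ∨ PySem.Chars.find m s < p)
      · have h1 : pvStepI m p s = PySem.Chars.find m s := by simp [pvStepI, hc]
        rw [h1]
        rcases ih (PySem.Chars.find m s) (Or.inr hc.1) with ⟨he, hall⟩ | ⟨h0, hor, hle, hmin⟩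
        · right
          rw [he]
          refine ⟨hc.1, Or.inr ⟨s, by simp, rfl⟩, by omega, ?_⟩
          intro t ht h0t
          rcases List.mem_cons.mp ht with ht | ht
          · subst ht; omega
          · have := hall t ht; omega
        · right
          refine ⟨h0, ?_, by omega, ?_⟩
          · rcases hor with hor | ⟨t, ht, hte⟩
            · exact Or.inr ⟨s, by simp, hor.symm⟩
            · exact Or.inr ⟨t, by simp [ht], hte⟩
          · intro t ht h0t
            rcases List.mem_cons.mp ht with ht | ht
            · subst ht; exact hle hc.1
            · exact hmin t ht h0t
      · have h1 : pvStepI m p s = p := by simp [pvStepI, hc]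
        rw [h1]
        have hs1 : -1 ≤ PySem.Chars.find m s := PySem.Chars.neg_one_le_find m s
        rcases ih p hp with ⟨he, hall⟩ | ⟨h0, hor, hle, hmin⟩
        · by_cases hneg : PySem.Chars.find m s = -1
          · left
            refine ⟨he, ?_⟩
            intro t ht
            rcases List.mem_cons.mp ht with ht | ht
            · subst ht; exact hneg
            · exact hall t ht
          · -- then 0 ≤ find and ¬(p < 0 ∨ find < p): p ≥ 0 and p ≤ find
            right
            have hp0 : 0 ≤ p := by rcases hp with h | h <;> omega
            refine ⟨by omega, Or.inl he, by omega, ?_⟩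
            intro t ht h0t
            rcases List.mem_cons.mp ht with ht | ht
            · subst ht; omega
            · have := hall t ht; omega
        · right
          refine ⟨h0, ?_, hle, ?_⟩
          · rcases hor with hor | ⟨t, ht, hte⟩
            · exact Or.inl hor
            · exact Or.inr ⟨t, by simp [ht], hte⟩
          · intro t ht h0t
            rcases List.mem_cons.mp ht with ht | ht
            · subst ht
              have hp0 : 0 ≤ p := by omega
              have := hle hp0
              omega
            · exact hmin t ht h0t

-- no spec occurs in m → no hit at any suffix
theorem pvNoHit (m : List Char) (hall : ∀ s ∈ pvSpecs, PySem.Chars.find m s = -1) :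
    ∀ j, pvHit (m.drop j) = false := by
  intro j
  rw [Bool.eq_false_iff]
  intro hh
  rcases (pvHit_iff _).mp hh with ⟨s, hs, hpre⟩
  have hinfix : ¬ s <:+: m := (PySem.Chars.find_eq_neg_one_iff m s).mp (hall s hs)
  have : PySem.Chars.isIn s m = true :=
    (PySem.Chars.exists_prefix_drop_iff_isIn s m).mp ⟨j, hpre⟩
  exact hinfix ((PySem.Chars.isIn_iff_infix s m).mp this)

-- the tail computations agree for every main_part
theorem pvTail_eq (m : List Char) : pvFindAndCut m = pvScanAndCut m := by
  unfold pvFindAndCut pvScanAndCut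
  obtain ⟨hsnd, hfst⟩ := pvFold_pair m pvSpecs (none, -1) (by simp)
  rcases pvFoldI_spec m pvSpecs (-1) (Or.inl rfl) with ⟨he, hall⟩ | ⟨h0, hor, _, hmin⟩
  · -- no specifier anywhere: both sides return (none, "")
    have hscan : pvScanSpec m = none := (pvScan_none_iff m).mpr (pvNoHit m hall)
    rw [hscan]
    rw [if_pos (Or.inl (hfst.mpr (by rw [he]; norm_num)))]
  · -- a specifier occurs in m: both cut at the same position
    have hsome : ∃ s ∈ pvSpecs, PySem.Chars.find m s = pvSpecs.foldl (pvStepI m) (-1) := by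
      rcases hor with hor | h
      · omega
      · exact h
    rcases hsome with ⟨s0, hs0, hf0⟩
    have hscan : pvScanSpec m = some (pvSpecs.foldl (pvStepI m) (-1)).toNat := by
      rw [pvScan_some_iff]
      constructor
      · -- s0 is a prefix of m.drop r.toNat
        have := (PySem.Chars.find_spec (s := m) (sub := s0) (by omega)).1
        rw [hf0] at this
        exact (pvHit_iff _).mpr ⟨s0, hs0, this⟩
      · intro k hk
        rw [Bool.eq_false_iff]
        intro hh
        rcases (pvHit_iff _).mp hh with ⟨s, hs, hpre⟩
        have hnn : 0 ≤ PySem.Chars.find m s := by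
          rw [PySem.Chars.find_nonneg_iff]
          exact (PySem.Chars.isIn_iff_infix s m).mp
            ((PySem.Chars.exists_prefix_drop_iff_isIn s m).mp ⟨k, hpre⟩)
        have hfle : (PySem.Chars.find m s).toNat ≤ k := by
          by_contra hlt
          exact (PySem.Chars.find_spec hnn).2 k (by omega) hpre
        have := hmin s hs hnn
        omega
    rw [hscan]
    rw [if_neg (by simp only [hsnd, hfst]; omega)]
    rw [hsnd, PySem.List.slice_to m h0]

-- ===== VERDICT (by name: the statement is the Claim_ definition above) =====
theorem parse_req_line_spec : Claim_equal_parse_req_line := by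
  intro line _
  unfold Spec_parse_req_line parse_req_line parse_req_line_alt
  by_cases hguard : PySem.Chars.strip line.toList = [] ∨
      PySem.Chars.startswith (PySem.Chars.strip line.toList) ['#'] = true ∨
      PySem.Chars.startswith (PySem.Chars.strip line.toList) ['-'] = true
  · simp only [if_pos hguard]
  · simp only [if_neg hguard]
    exact pvTail_eq _
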